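-- pv_equiv track=rewrite | github.com/thieulong/Python-Spell-Checker | spell_check.py | generate_suggest_dict
-- ===== SOURCE A (Python) =====
-- def generate_suggest_dict(word, word_split, word_list, length_limit = 5):
--
--     first_letter = 0
--     last_letter = -1
--
--     word_length = len(word)
--
--     suggest = list()
--
--     for e in range(len(word_list)):
--
--         if word_list[e][1:] == word[1:]:
--
--             suggest.append(word_list[e])
--
--     for i in range(len(word_split)):
--
--         if i == first_letter:
--
--             for e in range(len(word_list)):
--
--                 if word_split[first_letter] == word_list[e][first_letter]:
--
--                     suggest.append(word_list[e])
--
--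
--     for i in range(len(suggest)):
--
--         if len(suggest[i]) < word_length:
--
--                 suggest[i] = None
--
--         elif len(suggest[i]) - word_length not in range(length_limit):
--
--                 suggest[i] = None
--
--
--     suggest = list(filter(None, suggest))
--
--     suggest_dict = {key : 0 for key in suggest}
--
--     return suggest_dict
-- ===== SOURCE B (Python) =====
-- def generate_suggest_dict(word, word_split, word_list, length_limit = 5):
--     # Index word_list once: by tail (w[1:]) and, when needed, by first character;
--     # candidates then come from two dict lookups instead of predicate scans of word_list.
--     by_tail = {}
--     by_first = {}
--     need_first = bool(word_split)
--     for w in word_list: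
--         by_tail.setdefault(w[1:], []).append(w)
--         if need_first:
--             by_first.setdefault(w[0], []).append(w)
--
--     n = len(word)
--     cands = list(by_tail.get(word[1:], []))
--     if word_split:
--         cands += by_first.get(word_split[0], [])
--
--     result = {}
--     for w in cands:
--         if w and len(w) >= n and (len(w) - n) in range(length_limit):
--             result[w] = 0
--     return result
-- ===== Notes on version B (the rewrite author's own statement) =====
-- stated objective: faster
-- what changed: A finds candidates by two predicate scans of word_list (re-slicing both word[1:] and each word per comparison) followed by a None-marking pass, a filter pass and a dict comprehension; B builds hash indexes grouping words by their tail w[1:] (and, when word_split is non-empty, by their first character) in one pass, obtains the candidate list by two dict lookups against the once-computed word[1:], and fills the result dict in one filtered loop.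
import Mathlib
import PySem

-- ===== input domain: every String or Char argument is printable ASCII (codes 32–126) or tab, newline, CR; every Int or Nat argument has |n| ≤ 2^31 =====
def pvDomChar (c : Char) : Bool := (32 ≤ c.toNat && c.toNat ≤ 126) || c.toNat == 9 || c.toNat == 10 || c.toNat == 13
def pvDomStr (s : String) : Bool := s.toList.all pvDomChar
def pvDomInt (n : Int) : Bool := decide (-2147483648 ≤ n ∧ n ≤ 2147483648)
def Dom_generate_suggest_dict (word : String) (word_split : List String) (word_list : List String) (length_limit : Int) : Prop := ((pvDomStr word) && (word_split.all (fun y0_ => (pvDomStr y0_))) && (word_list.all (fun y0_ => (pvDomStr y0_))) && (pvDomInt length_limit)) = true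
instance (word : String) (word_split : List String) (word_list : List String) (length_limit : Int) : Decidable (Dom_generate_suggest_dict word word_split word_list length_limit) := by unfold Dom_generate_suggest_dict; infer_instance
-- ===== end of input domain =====

-- B replaces A's predicate scans of word_list by hash indexes (by tail w[1:] and, when needed,
-- by first character) built in one pass; candidates come from two dict lookups (objective: faster,
-- measured).

-- ===== PORT A =====
-- word_list[e][1:] == word[1:]
def pvA_suffixEq (word w : String) : Bool :=
  PySem.Str.slice w (some 1) none == PySem.Str.slice word (some 1) none

-- word_split[first_letter] == word_list[e][first_letter]; on w = "" Python raises IndexError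
-- (excluded by Pre_): the total port returns false there.
def pvA_firstEq (word_split : List String) (w : String) : Bool :=
  match PySem.Str.pyGet? w 0 with
  | some c => PySem.List.pyGetD word_split 0 "" == String.ofList [c]
  | none => false

-- the third loop's body: suggest[i] = None on the rejected entries
-- ('d not in range(length_limit)' is ¬(0 ≤ d ∧ d < length_limit) by PySem.List.mem_pyRange_one;
--  stated arithmetically so the port does not materialise range(length_limit))
def pvA_mark (word_length length_limit : Int) (w : String) : Option String :=
  if PySem.Str.len w < word_length then none
  else if ¬ (0 ≤ PySem.Str.len w - word_length ∧ PySem.Str.len w - word_length < length_limit) then none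
  else some w

-- list(filter(None, suggest)): drops None entries and the falsy ""
def pvA_filterNone (o : Option String) : Option String :=
  match o with
  | none => none
  | some w => if w == "" then none else some w

def generate_suggest_dict (word : String) (word_split : List String) (word_list : List String) (length_limit : Int) : List (String × Int) :=
  let word_length : Int := PySem.Str.len word
  -- for e in range(len(word_list)): if word_list[e][1:] == word[1:]: suggest.append(word_list[e])
  let suggest : List String :=
    (PySem.List.pyRange 0 (word_list.length : Int) 1).foldl
      (fun acc e =>
        if pvA_suffixEq word (PySem.List.pyGetD word_list e "") then acc ++ [PySem.List.pyGetD word_list e ""] else acc) []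
  -- for i in range(len(word_split)): if i == first_letter: for e in range(len(word_list)): …
  let suggest : List String :=
    (PySem.List.pyRange 0 (word_split.length : Int) 1).foldl
      (fun acc i =>
        if i == 0 then
          (PySem.List.pyRange 0 (word_list.length : Int) 1).foldl
            (fun acc2 e =>
              if pvA_firstEq word_split (PySem.List.pyGetD word_list e "") then acc2 ++ [PySem.List.pyGetD word_list e ""] else acc2) acc
        else acc) suggest
  -- for i in range(len(suggest)): suggest[i] = None on rejects (element-wise in-place update = map)
  let marked : List (Option String) := suggest.map (pvA_mark word_length length_limit)
  let filtered : List String := marked.filterMap pvA_filterNone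
  -- {key : 0 for key in suggest}
  (filtered.foldl (fun d k => PySem.Dict.insert d k (0 : Int)) PySem.Dict.empty).items

-- ===== PORT B =====
-- w[0] as a one-character string (only consulted for non-empty w)
def pvB_head (w : String) : String :=
  match PySem.Str.pyGet? w 0 with
  | some c => String.ofList [c]
  | none => ""

-- Source B's length/truthiness test: w and len(w) >= n and (len(w) - n) in range(length_limit)
-- (range membership stated arithmetically, exact by PySem.List.mem_pyRange_one)
def pvB_keep (n length_limit : Int) (w : String) : Bool :=
  w != "" && decide (n ≤ PySem.Str.len w) &&
    decide (0 ≤ PySem.Str.len w - n ∧ PySem.Str.len w - n < length_limit)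

def generate_suggest_dict_alt (word : String) (word_split : List String) (word_list : List String) (length_limit : Int) : List (String × Int) :=
  -- one pass: by_tail.setdefault(w[1:], []).append(w); if need_first: by_first.setdefault(w[0], []).append(w)
  -- (w[0] is pvB_head w; Python raises IndexError on w = "" here, outside Pre_: the total port groups it under "")
  let need_first : Bool := !word_split.isEmpty
  let idx : PySem.Dict String (List String) × PySem.Dict String (List String) :=
    word_list.foldl
      (fun p w =>
        (p.1.modify (PySem.Str.slice w (some 1) none) [] (· ++ [w]),
         if need_first then p.2.modify (pvB_head w) [] (· ++ [w]) else p.2))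
      (PySem.Dict.empty, PySem.Dict.empty)
  let n : Int := PySem.Str.len word
  -- cands = list(by_tail.get(word[1:], [])); if word_split: cands += by_first.get(word_split[0], [])
  let cands : List String :=
    idx.1.getD (PySem.Str.slice word (some 1) none) [] ++
      (match word_split with
       | [] => []
       | first :: _ => idx.2.getD first [])
  -- for w in cands: if w and len(w) >= n and (len(w)-n) in range(length_limit): result[w] = 0
  (cands.foldl
    (fun d w => if pvB_keep n length_limit w then d.insert w (0 : Int) else d)
    PySem.Dict.empty).items

-- ===== PRECONDITION & SPEC =====
-- Pre_ excludes exactly the inputs where the Python A raises IndexError: word_split non-empty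
-- together with an empty string in word_list (A reads word_list[e][0]); B raises there too.
def Pre_generate_suggest_dict (word : String) (word_split : List String) (word_list : List String) (length_limit : Int) : Prop :=
  word_split = [] ∨ "" ∉ word_list
instance (word : String) (word_split : List String) (word_list : List String) (length_limit : Int) : Decidable (Pre_generate_suggest_dict word word_split word_list length_limit) := by unfold Pre_generate_suggest_dict; infer_instance

def pvWitness_generate_suggest_dict : String × List String × List String × Int :=
  ("cat", ["c"], ["cap", "bat", "cat"], 5)

def Spec_generate_suggest_dict (word : String) (word_split : List String) (word_list : List String) (length_limit : Int) (out : List (String × Int)) : Prop := out = generate_suggest_dict_alt word word_split word_list length_limit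
instance (word : String) (word_split : List String) (word_list : List String) (length_limit : Int) (out : List (String × Int)) : Decidable (Spec_generate_suggest_dict word word_split word_list length_limit out) := by unfold Spec_generate_suggest_dict; infer_instance

-- ===== CLAIM (what is proved, stated in full; the proofs are below) =====
def Claim_equal_generate_suggest_dict : Prop := ∀ (word : String) (word_split : List String) (word_list : List String) (length_limit : Int), Dom_generate_suggest_dict word word_split word_list length_limit → Pre_generate_suggest_dict word word_split word_list length_limit → Spec_generate_suggest_dict word word_split word_list length_limit (generate_suggest_dict word word_split word_list length_limit)

-- ===== LEMMAS AND PROOFS =====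

-- a fold that only acts at index 0 is the identity over a list of nonzero indices
theorem pv_foldl_skip {α : Type} (g : List α → List α) (l : List Int) (h : ∀ x ∈ l, x ≠ 0)
    (acc : List α) : l.foldl (fun acc i => if i == 0 then g acc else acc) acc = acc := by
  induction l generalizing acc with
  | nil => rfl
  | cons x t ih =>
    have hx : (x == 0) = false := by simpa using h x (by simp)
    rw [List.foldl_cons, hx]
    exact ih (fun y hy => h y (List.mem_cons_of_mem _ hy)) acc

-- a conditionally-acting fold is the unconditional fold over the filtered list
theorem pv_foldl_if_filter {α β : Type} (p : α → Bool) (g : β → α → β) (l : List α) (d : β) :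
    l.foldl (fun d w => if p w then g d w else d) d =
      (l.filter p).foldl g d := by
  induction l generalizing d with
  | nil => rfl
  | cons x t ih =>
    by_cases hx : p x = true <;> simp [hx, ih]

-- A's mark-then-filter(None) survival test on one word equals B's keep
theorem pv_keep_eq (n L : Int) (w : String) :
    pvA_filterNone (pvA_mark n L w) = (if pvB_keep n L w then some w else none) := by
  simp only [pvA_filterNone, pvA_mark, pvB_keep]
  by_cases h0 : w = "" <;> split_ifs <;> simp_all <;> omega

-- A's whole None-marking pass followed by filter(None) is one filter by B's keep
theorem pv_markfilter (n L : Int) (s : List String) :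
    (s.map (pvA_mark n L)).filterMap pvA_filterNone = s.filter (pvB_keep n L) := by
  induction s with
  | nil => rfl
  | cons x t ih =>
    rw [List.map_cons, List.filterMap_cons, pv_keep_eq n L x]
    by_cases h : pvB_keep n L x = true <;> simp [h, ih]

-- the pair-state index-building fold, componentwise
theorem pv_idx_fst (b : Bool) (wl : List String) (d1 d2 : PySem.Dict String (List String)) :
    (wl.foldl
      (fun p w =>
        (p.1.modify (PySem.Str.slice w (some 1) none) [] (· ++ [w]),
         if b then p.2.modify (pvB_head w) [] (· ++ [w]) else p.2))
      (d1, d2)).1 =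
    wl.foldl (fun d w => d.modify (PySem.Str.slice w (some 1) none) [] (· ++ [w])) d1 := by
  induction wl generalizing d1 d2 with
  | nil => rfl
  | cons x t ih => cases b <;> simp only [List.foldl_cons, if_true] <;> exact ih _ _

theorem pv_idx_snd (b : Bool) (wl : List String) (d1 d2 : PySem.Dict String (List String)) :
    (wl.foldl
      (fun p w =>
        (p.1.modify (PySem.Str.slice w (some 1) none) [] (· ++ [w]),
         if b then p.2.modify (pvB_head w) [] (· ++ [w]) else p.2))
      (d1, d2)).2 =
    (if b then wl.foldl (fun d w => d.modify (pvB_head w) [] (· ++ [w])) d2 else d2) := by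
  induction wl generalizing d1 d2 with
  | nil => cases b <;> rfl
  | cons x t ih => cases b <;> simp only [List.foldl_cons, if_true] <;> exact ih _ _

-- a group-by fold looked up at one key is the filter by that key
theorem pv_groupby {α : Type} (key : α → String) (l : List α) (c : String)
    (d : PySem.Dict String (List α)) :
    (l.foldl (fun d w => d.modify (key w) [] (· ++ [w])) d).getD c [] =
      d.getD c [] ++ l.filter (fun w => key w == c) := by
  have h := PySem.Dict.getD_foldl_modify_append (l := l.map (fun w => (key w, w))) (d := d) (c := c)
  rw [List.foldl_map] at h
  rw [h, List.filter_map, List.map_map]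
  congr 1
  simp [Function.comp_def]

-- nonempty strings have a first character
theorem pv_head_some (w : String) (h : w ≠ "") : ∃ c, PySem.Str.pyGet? w 0 = some c := by
  cases hl : w.toList with
  | nil => exact absurd (by ext : 1; simp [hl]) h
  | cons c t =>
    refine ⟨c, ?_⟩
    simp [PySem.Str.pyGet?, PySem.List.pyGet?, PySem.List.pyIdx?, hl]

-- the first-letter tests of the two ports agree
theorem pv_firstEq_eq (f : String) (rest : List String) (w : String) :
    pvA_firstEq (f :: rest) w = ((w != "") && (pvB_head w == f)) := by
  by_cases h0 : w = ""
  · subst h0; simp [pvA_firstEq, pvB_head, PySem.Str.pyGet?, PySem.List.pyGet?, PySem.List.pyIdx?]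
  · obtain ⟨c, hc⟩ := pv_head_some w h0
    simp only [pvA_firstEq, pvB_head, hc, PySem.List.pyGetD_zero_cons]
    have hw : (w != "") = true := by simp [h0]
    rw [hw, Bool.true_and]
    rcases eq_or_ne f (String.ofList [c]) with he | he
    · simp [he]
    · simp [he, Ne.symm he]

-- ===== VERDICT (by name: the statement is the Claim_ definition above) =====
theorem generate_suggest_dict_spec : Claim_equal_generate_suggest_dict := by
  intro word word_split word_list length_limit _hdom _hpre
  show generate_suggest_dict word word_split word_list length_limit
      = generate_suggest_dict_alt word word_split word_list length_limit
  simp only [generate_suggest_dict, generate_suggest_dict_alt]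
  rw [PySem.List.foldl_pyRange_zero_pyGetD' word_list ""
        (fun acc w => if pvA_suffixEq word w then acc ++ [w] else acc) [],
      PySem.List.foldl_append_if (f := fun w => w), List.nil_append,
      pv_idx_fst, pv_idx_snd, pv_groupby, PySem.Dict.getD_empty]
  cases word_split with
  | nil =>
    simp only [List.length_nil, Nat.cast_zero, PySem.List.pyRange_zero, Int.toNat_zero,
      List.range_zero, List.map_nil, List.foldl_nil, List.map_id', List.append_nil]
    rw [pv_markfilter (PySem.Str.len word) length_limit,
        pv_foldl_if_filter (p := pvB_keep (PySem.Str.len word) length_limit)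
          (g := fun d w => PySem.Dict.insert d w (0 : Int))]
    rfl
  | cons first rest =>
    rw [PySem.List.pyRange_one_cons (a := 0) (b := (((first :: rest).length : Nat) : Int))
          (by exact_mod_cast Nat.succ_pos rest.length),
        List.foldl_cons]
    simp only [beq_self_eq_true, if_true]
    rw [pv_foldl_skip _ _ (by
          intro x hx
          rw [PySem.List.mem_pyRange_one] at hx
          omega)]
    rw [PySem.List.foldl_pyRange_zero_pyGetD' word_list ""
          (fun acc w => if pvA_firstEq (first :: rest) w then acc ++ [w] else acc) _,
        PySem.List.foldl_append_if (f := fun w => w)]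
    simp only [List.map_id']
    simp only [List.isEmpty_cons, Bool.not_false, if_true]
    rw [pv_markfilter (PySem.Str.len word) length_limit, pv_groupby, PySem.Dict.getD_empty,
        pv_foldl_if_filter (p := pvB_keep (PySem.Str.len word) length_limit)
          (g := fun d w => PySem.Dict.insert d w (0 : Int))]
    have hnotin : "" ∉ word_list := by
      rcases _hpre with h | h
      · exact absurd h (by simp)
      · exact h
    have h1 : List.filter (pvA_suffixEq word) word_list
        = List.filter (fun w => PySem.Str.slice w (some 1) none == PySem.Str.slice word (some 1) none) word_list :=
      List.filter_congr (fun w _ => by simp [pvA_suffixEq])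
    have h2 : List.filter (pvA_firstEq (first :: rest)) word_list
        = List.filter (fun a => pvB_head a == first) word_list :=
      List.filter_congr (fun w hw => by
        have hne : w ≠ "" := fun e => hnotin (e ▸ hw)
        rw [pv_firstEq_eq]; simp [hne])
    rw [List.nil_append, List.nil_append, h1, h2]
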